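-- pv_equiv track=rewrite | github.com/shashidharummaneni/Python_Assignment_CSA0898 | Isomorphic.py | compare_indexes
-- ===== SOURCE A (Python) =====
-- def compare_indexes(ch1,ch2,s1,s2):
--     ind1 = []
--     ind2 = []
--     for i in range(len(s1)):
--         if ch1 == s1[i]: ind1.append(i)
--         if ch2 == s2[i]: ind2.append(i)
--     if ind1==ind2:
--         return True
-- ===== SOURCE B (Python) =====
-- def compare_indexes(ch1, ch2, s1, s2):
--     if all((a == ch1) == (b == ch2) for a, b in zip(s1, s2)):
--         return True
-- ===== Notes on version B (the rewrite author's own statement) =====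
-- stated objective: simpler
-- what changed: Instead of materializing the two index lists over range(len(s1)) and comparing them, B makes one pass over zip(s1, s2) checking pointwise that (a==ch1) agrees with (b==ch2); no lists are built.
import Mathlib
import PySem

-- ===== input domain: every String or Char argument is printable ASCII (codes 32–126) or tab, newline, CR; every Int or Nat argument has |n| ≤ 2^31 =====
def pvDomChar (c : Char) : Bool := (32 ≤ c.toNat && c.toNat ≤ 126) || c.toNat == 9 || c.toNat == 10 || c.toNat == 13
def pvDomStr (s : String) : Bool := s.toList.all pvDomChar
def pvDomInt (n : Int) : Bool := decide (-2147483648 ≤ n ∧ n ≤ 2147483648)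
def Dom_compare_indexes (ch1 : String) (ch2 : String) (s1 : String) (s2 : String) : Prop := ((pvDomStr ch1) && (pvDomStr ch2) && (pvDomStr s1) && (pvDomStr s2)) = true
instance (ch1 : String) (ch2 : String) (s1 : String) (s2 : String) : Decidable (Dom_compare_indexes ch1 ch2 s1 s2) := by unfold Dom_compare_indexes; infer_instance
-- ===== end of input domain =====

-- B replaces A's two materialized index lists (built over range(len(s1)) and then
-- compared) by one pass over zip(s1, s2) checking pointwise agreement; objective: simpler.

-- ===== PORT A =====
-- literal transliteration of A: build ind1/ind2 over range(len(s1)); s2[i] may raise (none state)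
def compare_indexes (ch1 : String) (ch2 : String) (s1 : String) (s2 : String) : Option Bool :=
  match (PySem.List.pyRange 0 (PySem.Str.len s1) 1).foldl
      (fun st i => match st with
        | none => none
        | some (ind1, ind2) =>
          match PySem.Str.pyGet? s1 i, PySem.Str.pyGet? s2 i with
          | some c1, some c2 =>
              some ((if ch1.toList = [c1] then ind1 ++ [i] else ind1),
                    (if ch2.toList = [c2] then ind2 ++ [i] else ind2))
          | _, _ => none)
      (some (([] : List Int), ([] : List Int))) with
  | none => none            -- IndexError: excluded by Pre_
  | some (ind1, ind2) => if ind1 = ind2 then some true else none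

-- ===== PORT B =====
-- literal transliteration of B: all((a == ch1) == (b == ch2) for a, b in zip(s1, s2))
def compare_indexes_alt (ch1 : String) (ch2 : String) (s1 : String) (s2 : String) : Option Bool :=
  if (s1.toList.zip s2.toList).all
      (fun p => (decide ([p.1] = ch1.toList)) == (decide ([p.2] = ch2.toList)))
  then some true else none

-- ===== PRECONDITION & SPEC =====
-- A raises IndexError (unconditional s2[i]) exactly when s2 is shorter than s1; Pre_ excludes that.
def Pre_compare_indexes (ch1 : String) (ch2 : String) (s1 : String) (s2 : String) : Prop :=
  s1.toList.length ≤ s2.toList.length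
instance (ch1 : String) (ch2 : String) (s1 : String) (s2 : String) : Decidable (Pre_compare_indexes ch1 ch2 s1 s2) := by unfold Pre_compare_indexes; infer_instance
def pvWitness_compare_indexes : String × String × String × String := ("a", "b", "ab", "xy")

def Spec_compare_indexes (ch1 : String) (ch2 : String) (s1 : String) (s2 : String) (out : Option Bool) : Prop := out = compare_indexes_alt ch1 ch2 s1 s2
instance (ch1 : String) (ch2 : String) (s1 : String) (s2 : String) (out : Option Bool) : Decidable (Spec_compare_indexes ch1 ch2 s1 s2 out) := by unfold Spec_compare_indexes; infer_instance

-- ===== CLAIM (what is proved, stated in full; the proofs are below) =====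
def Claim_equal_compare_indexes : Prop := ∀ (ch1 : String) (ch2 : String) (s1 : String) (s2 : String), Dom_compare_indexes ch1 ch2 s1 s2 → Pre_compare_indexes ch1 ch2 s1 s2 → Spec_compare_indexes ch1 ch2 s1 s2 (compare_indexes ch1 ch2 s1 s2)

-- ===== LEMMAS AND PROOFS =====

-- the index list A builds for predicate p after k iterations
def pvIdxs (p : Nat → Bool) (k : Nat) : List Int :=
  ((List.range k).filter p).map (fun j => (j : Int))

-- A's fold over range(k) computes exactly the two filtered index lists
lemma pvFoldA (ch1 ch2 : String) (l1 l2 : List Char) (k : Nat)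
    (hk1 : k ≤ l1.length) (hk2 : k ≤ l2.length) :
    (PySem.List.pyRange 0 (k : Int) 1).foldl
      (fun st i => match st with
        | none => none
        | some (ind1, ind2) =>
          match PySem.List.pyGet? l1 i, PySem.List.pyGet? l2 i with
          | some c1, some c2 =>
              some ((if ch1.toList = [c1] then ind1 ++ [i] else ind1),
                    (if ch2.toList = [c2] then ind2 ++ [i] else ind2))
          | _, _ => none)
      (some (([] : List Int), ([] : List Int)))
    = some (pvIdxs (fun j => decide (ch1.toList = [l1.getD j ' '])) k,
            pvIdxs (fun j => decide (ch2.toList = [l2.getD j ' '])) k) := by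
  induction k with
  | zero => simp [PySem.List.pyRange_one_eq_nil, pvIdxs]
  | succ k ih =>
    have h1 : k < l1.length := by omega
    have h2 : k < l2.length := by omega
    have hr : PySem.List.pyRange 0 ((k + 1 : Nat) : Int) 1
        = PySem.List.pyRange 0 (k : Int) 1 ++ [(k : Int)] := by
      have := PySem.List.pyRange_one_succ_right (a := 0) (b := (k : Int)) (by positivity)
      simpa [Nat.cast_add, Nat.cast_one] using this
    rw [hr, List.foldl_append, ih (by omega) (by omega)]
    simp only [List.foldl_cons, List.foldl_nil]
    have e1 : PySem.List.pyGet? l1 ((k : Nat) : Int) = some l1[k] := by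
      rw [PySem.List.pyGet?_natCast]; simp [List.getElem?_eq_getElem h1]
    have e2 : PySem.List.pyGet? l2 ((k : Nat) : Int) = some l2[k] := by
      rw [PySem.List.pyGet?_natCast]; simp [List.getElem?_eq_getElem h2]
    rw [e1, e2]
    simp only [pvIdxs, List.range_succ, List.filter_append,
      List.filter_cons, List.filter_nil]
    have d1 : l1.getD k ' ' = l1[k] := by simp [List.getD, List.getElem?_eq_getElem h1]
    have d2 : l2.getD k ' ' = l2[k] := by simp [List.getD, List.getElem?_eq_getElem h2]
    rw [d1, d2]
    by_cases c1 : ch1.toList = [l1[k]] <;> by_cases c2 : ch2.toList = [l2[k]] <;>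
      simp [c1, c2]

-- equal filtered index lists ↔ the two predicates agree on range n
lemma pvIdxs_eq_iff (p q : Nat → Bool) (n : Nat) :
    pvIdxs p n = pvIdxs q n ↔ ∀ j < n, p j = q j := by
  constructor
  · intro h j hj
    have hmem : ((j : Int) ∈ pvIdxs p n) ↔ ((j : Int) ∈ pvIdxs q n) := by rw [h]
    simp only [pvIdxs, List.mem_map] at hmem
    by_cases hp : p j <;> by_cases hq : q j <;>
      simp [hp, hq, hj] at hmem ⊢
  · intro h
    unfold pvIdxs
    rw [List.filter_congr (fun j hj => h j (List.mem_range.mp hj))]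

-- B's all over the zip ↔ pointwise agreement on range (length of s1, given s1 ≤ s2)
lemma pvAllZip (ch1 ch2 : String) (l1 l2 : List Char) (h : l1.length ≤ l2.length) :
    ((l1.zip l2).all
      (fun p => (decide ([p.1] = ch1.toList)) == (decide ([p.2] = ch2.toList))) = true)
    ↔ ∀ j < l1.length,
        decide (ch1.toList = [l1.getD j ' ']) = decide (ch2.toList = [l2.getD j ' ']) := by
  rw [List.all_eq_true]
  constructor
  · intro hall j hj
    have hj2 : j < l2.length := by omega
    have hjz : j < (l1.zip l2).length := by
      rw [List.length_zip]; omega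
    have hmem : (l1[j], l2[j]) ∈ l1.zip l2 := by
      have hz : (l1.zip l2)[j] = (l1[j], l2[j]) := List.getElem_zip
      rw [← hz]; exact List.getElem_mem hjz
    have hb := hall _ hmem
    simp only [beq_iff_eq] at hb
    simp only [List.getD, List.getElem?_eq_getElem hj, List.getElem?_eq_getElem hj2,
      Option.getD_some]
    by_cases h1 : ch1.toList = [l1[j]] <;> by_cases h2 : ch2.toList = [l2[j]] <;>
      simp [h1, h2, eq_comm] at hb ⊢
  · intro hpt p hp
    obtain ⟨j, hjz, hget⟩ := List.getElem_of_mem hp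
    have hjl : j < l1.length := by
      rw [List.length_zip] at hjz; omega
    have hj2 : j < l2.length := by omega
    have hz : (l1.zip l2)[j] = (l1[j], l2[j]) := List.getElem_zip
    rw [hz] at hget
    have hb := hpt j hjl
    simp only [List.getD, List.getElem?_eq_getElem hjl, List.getElem?_eq_getElem hj2,
      Option.getD_some] at hb
    subst hget
    simp only [beq_iff_eq]
    by_cases h1 : ch1.toList = [l1[j]] <;> by_cases h2 : ch2.toList = [l2[j]] <;>
      simp [h1, h2, eq_comm] at hb ⊢

-- ===== VERDICT (by name: the statement is the Claim_ definition above) =====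
theorem compare_indexes_spec : Claim_equal_compare_indexes := by
  intro ch1 ch2 s1 s2 _ hpre
  unfold Pre_compare_indexes at hpre
  unfold Spec_compare_indexes compare_indexes compare_indexes_alt
  have hfold := pvFoldA ch1 ch2 s1.toList s2.toList s1.toList.length (le_refl _) hpre
  simp only [PySem.Str.len_eq, PySem.Str.pyGet?, PySem.Chars.pyGet?_eq_listPyGet?] at *
  rw [hfold]
  by_cases hall : ((s1.toList.zip s2.toList).all
      (fun p => (decide ([p.1] = ch1.toList)) == (decide ([p.2] = ch2.toList))) = true)
  · have := (pvAllZip ch1 ch2 s1.toList s2.toList hpre).mp hall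
    have heq := (pvIdxs_eq_iff _ _ s1.toList.length).mpr this
    simp [hall]
    simpa [List.getD] using heq
  · have : ¬ ∀ j < s1.toList.length,
        decide (ch1.toList = [s1.toList.getD j ' ']) = decide (ch2.toList = [s2.toList.getD j ' ']) :=
      fun hc => hall ((pvAllZip ch1 ch2 s1.toList s2.toList hpre).mpr hc)
    have hne : ¬ (pvIdxs (fun j => decide (ch1.toList = [s1.toList.getD j ' '])) s1.toList.length
        = pvIdxs (fun j => decide (ch2.toList = [s2.toList.getD j ' '])) s1.toList.length) :=
      fun hc => this ((pvIdxs_eq_iff _ _ _).mp hc)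
    simp [hall]
    simpa [List.getD] using hne
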